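-- pv_equiv track=rewrite | github.com/tjwls11/Eclipso | server/modules/xls_module.py | mask_except_hypen
-- ===== SOURCE A (Python) =====
-- def mask_except_hypen(orig_segment: str) -> str:
--     out_chars = []
--     for ch in orig_segment:
--         if ch == "-":
--             out_chars.append("-")
--         else:
--             out_chars.append("*")
--     return "".join(out_chars)
-- ===== SOURCE B (Python) =====
-- def mask_except_hypen(orig_segment: str) -> str:
--     return "-".join("*" * len(seg) for seg in orig_segment.split("-"))
-- ===== Notes on version B (the rewrite author's own statement) =====
-- stated objective: simpler
-- what changed: B replaces A's per-character branch-and-append loop with a split on the hyphen into hyphen-free segments, each replaced wholesale by an asterisk run of its length and rejoined with hyphens.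
import Mathlib
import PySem

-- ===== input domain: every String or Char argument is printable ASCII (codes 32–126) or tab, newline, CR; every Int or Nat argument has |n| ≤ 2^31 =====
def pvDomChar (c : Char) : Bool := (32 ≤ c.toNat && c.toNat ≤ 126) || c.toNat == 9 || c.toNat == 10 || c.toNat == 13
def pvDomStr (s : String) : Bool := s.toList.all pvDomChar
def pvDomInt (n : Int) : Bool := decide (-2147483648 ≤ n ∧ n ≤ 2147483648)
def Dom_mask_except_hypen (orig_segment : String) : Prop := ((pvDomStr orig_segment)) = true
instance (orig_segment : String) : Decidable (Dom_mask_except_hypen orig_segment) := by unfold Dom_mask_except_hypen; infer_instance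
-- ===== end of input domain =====

-- B masks by splitting on '-' and replacing each hyphen-free segment by '*' repeated to its
-- length, instead of A's per-character loop; objective: simpler.

-- ===== PORT A =====
-- for ch in orig_segment: append "-" or "*";  "".join(out_chars)
def mask_except_hypen (orig_segment : String) : String :=
  let out_chars : List String :=
    orig_segment.toList.foldl
      (fun acc ch => if ch == '-' then acc ++ ["-"] else acc ++ ["*"]) []
  PySem.Str.join "" out_chars

-- ===== PORT B =====
-- "-".join("*" * len(seg) for seg in orig_segment.split("-"))
def mask_except_hypen_alt (orig_segment : String) : String :=
  PySem.Str.join "-"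
    ((PySem.Chars.splitOn orig_segment.toList ['-']).map
      (fun seg => String.ofList (PySem.List.pyRepeat ['*'] (seg.length : Int))))

-- ===== PRECONDITION & SPEC =====
def Spec_mask_except_hypen (orig_segment : String) (out : String) : Prop := out = mask_except_hypen_alt orig_segment
instance (orig_segment : String) (out : String) : Decidable (Spec_mask_except_hypen orig_segment out) := by unfold Spec_mask_except_hypen; infer_instance

-- ===== CLAIM (what is proved, stated in full; the proofs are below) =====
def Claim_equal_mask_except_hypen : Prop := ∀ (orig_segment : String), Dom_mask_except_hypen orig_segment → Spec_mask_except_hypen orig_segment (mask_except_hypen orig_segment)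

-- ===== LEMMAS AND PROOFS =====

-- the masking function, per character
def pvMask (c : Char) : Char := if c = '-' then '-' else '*'

-- recursive characterisation of splitting on a single '-'
def pvSplitAux : List Char → List Char → List (List Char)
  | [], cur => [cur.reverse]
  | c :: rest, cur => if c = '-' then cur.reverse :: pvSplitAux rest [] else pvSplitAux rest (c :: cur)

theorem pvSplitAux_ne_nil (l cur : List Char) : pvSplitAux l cur ≠ [] := by
  cases l with
  | nil => simp [pvSplitAux]
  | cons c rest => simp only [pvSplitAux]; split <;> [simp; exact pvSplitAux_ne_nil rest _]

-- go with enough fuel computes acc.reverse ++ pvSplitAux l cur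
theorem splitOn_go_spec (fuel : Nat) (l cur : List Char) (acc : List (List Char))
    (h : l.length ≤ fuel) :
    PySem.Chars.splitOn.go ['-'] fuel l cur acc = acc.reverse ++ pvSplitAux l cur := by
  induction fuel generalizing l cur acc with
  | zero =>
    have hl : l = [] := by cases l <;> simp_all
    subst hl
    have h0 : PySem.Chars.splitOn.go ['-'] 0 [] cur acc = ((cur.reverse ++ []) :: acc).reverse := by
      rw [PySem.Chars.splitOn.go.eq_def]
    simp [h0, pvSplitAux]
  | succ n ih =>
    cases l with
    | nil =>
      have h0 : PySem.Chars.splitOn.go ['-'] (n+1) [] cur acc = (cur.reverse :: acc).reverse := by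
        rw [PySem.Chars.splitOn.go.eq_def]
      simp [h0, pvSplitAux]
    | cons c rest =>
      have h' : rest.length ≤ n := by simpa using h
      have step : PySem.Chars.splitOn.go ['-'] (n+1) (c :: rest) cur acc =
          if ['-'].isPrefixOf (c :: rest) = true then
            PySem.Chars.splitOn.go ['-'] n (List.drop 1 (c :: rest)) [] (cur.reverse :: acc)
          else PySem.Chars.splitOn.go ['-'] n rest (c :: cur) acc := by
        rw [PySem.Chars.splitOn.go.eq_def]; rfl
      rw [step]
      by_cases hc : c = '-'
      · subst hc
        rw [if_pos (by simp [List.isPrefixOf])]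
        rw [ih _ _ _ (by simpa using h')]
        simp [pvSplitAux]
      · rw [if_neg (by simp [List.isPrefixOf, Ne.symm hc])]
        rw [ih _ _ _ h']
        simp [pvSplitAux, hc]

theorem splitOn_eq_pvSplitAux (cs : List Char) :
    PySem.Chars.splitOn cs ['-'] = pvSplitAux cs [] := by
  have := splitOn_go_spec (cs.length + 1) cs [] [] (by omega)
  simpa [PySem.Chars.splitOn] using this

-- joining the starified segments reproduces the per-character masking
theorem join_starify (cs cur : List Char) :
    PySem.Chars.join ['-'] ((pvSplitAux cs cur).map (fun seg => List.replicate seg.length '*')) =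
      List.replicate cur.length '*' ++ cs.map pvMask := by
  induction cs generalizing cur with
  | nil => simp [pvSplitAux, PySem.Chars.join_singleton]
  | cons c rest ih =>
    by_cases hc : c = '-'
    · subst hc
      simp only [pvSplitAux]
      obtain ⟨h, t, ht⟩ : ∃ h t, pvSplitAux rest [] = h :: t := by
        cases hx : pvSplitAux rest [] with
        | nil => exact absurd hx (pvSplitAux_ne_nil rest [])
        | cons h t => exact ⟨h, t, rfl⟩
      rw [ht, if_pos trivial]
      simp only [List.map_cons, PySem.Chars.join_cons_cons]
      have hih := ih []
      rw [ht] at hih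
      simp only [List.map_cons] at hih
      rw [hih]
      simp [pvMask]
    · simp only [pvSplitAux, if_neg hc]
      rw [ih (c :: cur)]
      simp [pvMask, hc, List.replicate_succ' (n := cur.length)]

-- A's fold builds the per-character single-char strings
theorem foldA (cs : List Char) (acc : List String) :
    cs.foldl (fun acc ch => if ch == '-' then acc ++ ["-"] else acc ++ ["*"]) acc =
      acc ++ cs.map (fun c => String.ofList [pvMask c]) := by
  induction cs generalizing acc with
  | nil => simp
  | cons c rest ih =>
    rw [List.foldl_cons]
    by_cases hc : c = '-'
    · rw [if_pos (by simp [hc]), ih]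
      simp [pvMask, hc]
    · rw [if_neg (by simp [hc]), ih]
      simp [pvMask, hc]

-- ===== VERDICT (by name: the statement is the Claim_ definition above) =====
theorem mask_except_hypen_spec : Claim_equal_mask_except_hypen := by
  intro s _
  unfold Spec_mask_except_hypen mask_except_hypen mask_except_hypen_alt
  simp only [foldA, List.nil_append]
  rw [splitOn_eq_pvSplitAux]
  unfold PySem.Str.join
  congr 1
  simp only [List.map_map]
  have hl : ∀ seg : List Char,
      (String.ofList (PySem.List.pyRepeat ['*'] (seg.length : Int))).toList =
        List.replicate seg.length '*' := by
    intro seg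
    rw [PySem.List.pyRepeat_singleton]
    simp
  calc PySem.Chars.join "".toList
        (List.map (fun c => (String.ofList [pvMask c]).toList) s.toList)
      = PySem.Chars.join [] (List.map (fun c => [c]) (s.toList.map pvMask)) := by
        simp [List.map_map]; rfl
    _ = s.toList.map pvMask := PySem.Chars.join_nil_singletons _
    _ = PySem.Chars.join ['-']
          ((pvSplitAux s.toList []).map (fun seg => List.replicate seg.length '*')) := by
        rw [join_starify]; simp
    _ = PySem.Chars.join "-".toList
          (List.map
            (fun x => (String.ofList (PySem.List.pyRepeat ['*'] (x.length : Int))).toList)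
            (pvSplitAux s.toList [])) := by
        simp only [hl]; rfl
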